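-- pv_equiv track=rewrite | github.com/sashaaero/binarysearch-problems | problems/easy/number_of_unique_character_substrings.py | solve
-- ===== SOURCE A (Python) =====
-- def solve(s):
--     res = cur_len = 1
--     cur_char = s[0]
--     for i, n in enumerate(s):
--         if i == 0: continue
--         if cur_char == n:
--             cur_len += 1
--             res += cur_len - 1
--         else:
--             cur_char = n
--             cur_len = 1
--
--         res += 1
--     return res
-- ===== SOURCE B (Python) =====
-- def solve(s):
--     # label each position with its prefix count of run boundaries; positions with
--     # the same label form one maximal run, and each group of k equal labels
--     # contributes k*(k+1)//2 single-character substrings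
--     marks = [0] if s else []
--     for a, b in zip(s, s[1:]):
--         marks.append(marks[-1] + (a != b))
--     counts = {}
--     for m in marks:
--         counts[m] = counts.get(m, 0) + 1
--     return sum(c * (c + 1) // 2 for c in counts.values())
-- ===== Notes on version B (the rewrite author's own statement) =====
-- stated objective: alternative
-- what changed: B labels every position with a prefix-sum of run boundaries, tallies the labels in a dict, and returns the sum of triangular numbers c*(c+1)//2 over the tallies, instead of A's single streaming pass that increments a result and current run length per character.
import Mathlib
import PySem

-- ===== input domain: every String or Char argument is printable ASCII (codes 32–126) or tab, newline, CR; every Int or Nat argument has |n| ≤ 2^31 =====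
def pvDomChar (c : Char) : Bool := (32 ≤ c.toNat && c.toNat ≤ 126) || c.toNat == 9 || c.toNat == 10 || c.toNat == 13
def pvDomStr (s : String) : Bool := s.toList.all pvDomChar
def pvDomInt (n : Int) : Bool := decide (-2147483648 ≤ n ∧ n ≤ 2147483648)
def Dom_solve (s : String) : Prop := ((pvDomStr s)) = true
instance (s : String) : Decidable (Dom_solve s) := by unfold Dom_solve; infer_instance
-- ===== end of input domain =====

-- B replaces A's streaming per-character accumulator by three staged passes:
-- boundary prefix-sum labels, a dict tally of the labels, and a triangular-number sum.

-- ===== PORT A =====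
-- one step of A's loop body over (res, cur_len, cur_char) at enumerate entry (i, n)
def solveStepA (st : Int × Int × Char) (p : Int × Char) : Int × Int × Char :=
  if p.1 = 0 then st
  else
    let st' :=
      if st.2.2 == p.2 then (st.1 + (st.2.1 + 1) - 1, st.2.1 + 1, st.2.2)
      else (st.1, (1 : Int), p.2)
    (st'.1 + 1, st'.2.1, st'.2.2)

def solve (s : String) : Int :=
  match s.toList with
  | [] => 0  -- Python raises IndexError at s[0]; excluded by Pre_solve
  | c :: _ => (List.foldl solveStepA (1, 1, c) (PySem.List.enumerate s.toList)).1

-- ===== PORT B =====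
def triB (c : Int) : Int := PySem.Int.floordiv (c * (c + 1)) 2

-- marks.append(marks[-1] + (a != b))
def markStep (acc : List Int) (p : Char × Char) : List Int :=
  acc ++ [PySem.List.pyGetD acc (-1) 0 + (if p.1 ≠ p.2 then 1 else 0)]

-- counts[m] = counts.get(m, 0) + 1
def tallyStep (d : PySem.Dict Int Int) (m : Int) : PySem.Dict Int Int :=
  d.insert m (d.getD m 0 + 1)

def solve_alt (s : String) : Int :=
  let cs := s.toList
  let marks0 : List Int := if cs.isEmpty then [] else [0]
  let marks := List.foldl markStep marks0 (cs.zip (PySem.List.slice cs (some 1) none))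
  let counts := List.foldl tallyStep PySem.Dict.empty marks
  (counts.values.map triB).sum

-- ===== PRECONDITION & SPEC =====
-- Pre_ excludes exactly the empty string, on which A raises IndexError at s[0].
def Pre_solve (s : String) : Prop := s ≠ ""
instance (s : String) : Decidable (Pre_solve s) := by unfold Pre_solve; infer_instance
def pvWitness_solve : String := "aab"

def Spec_solve (s : String) (out : Int) : Prop := out = solve_alt s
instance (s : String) (out : Int) : Decidable (Spec_solve s out) := by unfold Spec_solve; infer_instance

-- ===== CLAIM =====
def Claim_equal_solve : Prop := ∀ (s : String), Dom_solve s → Pre_solve s → Spec_solve s (solve s)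

-- ===== LEMMAS AND PROOFS =====

-- run lengths of the tail, given current char cc with current run length n
def runLens (cc : Char) (n : Int) : List Char → List Int
  | [] => [n]
  | r :: t => if cc = r then runLens cc (n + 1) t else n :: runLens r 1 t

def sumTri (l : List Int) : Int := (l.map triB).sum

-- boundary-prefix labels produced by B's first pass, given current char cc and current label m
def marksSeq (cc : Char) (m : Int) : List Char → List Int
  | [] => []
  | r :: t => (m + (if cc ≠ r then 1 else 0)) :: marksSeq r (m + (if cc ≠ r then 1 else 0)) t

lemma triB_succ (r : Int) : triB (r + 1) = triB r + (r + 1) := by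
  have he : ∀ a : Int, Even (a * (a + 1)) := Int.even_mul_succ_self
  obtain ⟨k, hk⟩ := he r
  obtain ⟨m, hm⟩ := he (r + 1)
  have e1 : triB r = k := by
    rw [triB, hk, show k + k = 2 * k by ring, PySem.Int.floordiv_eq_ediv_of_pos (by norm_num)]
    omega
  have e2 : triB (r + 1) = m := by
    rw [triB, hm, show m + m = 2 * m by ring, PySem.Int.floordiv_eq_ediv_of_pos (by norm_num)]
    omega
  rw [e1, e2]
  nlinarith [hk, hm]

lemma triB_one : triB 1 = 1 := by norm_num [triB, PySem.Int.floordiv]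

-- A-side invariant: the fold computes total plus the triangular sum of the run lengths
lemma a_inv (rest : List Char) : ∀ (total n : Int) (cc : Char) (k : Int), 0 < k →
    (List.foldl solveStepA (total + triB n, n, cc) (PySem.List.enumerate rest k)).1
      = total + sumTri (runLens cc n rest) := by
  induction rest with
  | nil => intro total n cc k hk; simp [runLens, sumTri]
  | cons r t ih =>
    intro total n cc k hk
    rw [PySem.List.enumerate_cons]
    simp only [List.foldl_cons]
    by_cases hc : cc = r
    · have hA : solveStepA (total + triB n, n, cc) (k, r)
          = (total + triB (n + 1), n + 1, cc) := by
        simp only [solveStepA, hc, if_neg (by omega : ¬ (k : Int) = 0), BEq.rfl, if_pos]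
        rw [triB_succ]; simp; ring
      rw [hA]
      have := ih total (n + 1) cc (k + 1) (by omega)
      rw [hc] at this ⊢
      rw [this, runLens, if_pos rfl]
    · have hb : (cc == r) = false := by simpa using hc
      have hA : solveStepA (total + triB n, n, cc) (k, r)
          = ((total + triB n) + triB 1, 1, r) := by
        simp [solveStepA, if_neg (by omega : ¬ (k : Int) = 0), hb, triB_one]
      rw [hA, ih (total + triB n) 1 r (k + 1) (by omega), runLens, if_neg hc]
      simp [sumTri]; ring

-- B pass 1: the marks fold appends the label sequence
lemma marks_inv (rest : List Char) : ∀ (acc : List Int) (x : List Int) (cc : Char) (m : Int),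
    acc = x ++ [m] →
    List.foldl markStep acc ((cc :: rest).zip rest) = acc ++ marksSeq cc m rest := by
  induction rest with
  | nil => intro acc x cc m _; simp [marksSeq]
  | cons r t ih =>
    intro acc x cc m hacc
    have hz : (cc :: r :: t).zip (r :: t) = (cc, r) :: (r :: t).zip t := rfl
    rw [hz]
    simp only [List.foldl_cons]
    have hstep : markStep acc (cc, r) = acc ++ [m + (if cc ≠ r then 1 else 0)] := by
      simp [markStep, hacc, PySem.List.pyGetD_neg_one_append_singleton]
    rw [hstep, ih (acc ++ [m + (if cc ≠ r then 1 else 0)]) acc r (m + (if cc ≠ r then 1 else 0)) rfl]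
    simp [marksSeq]

lemma getD_last (base : List (Int × Int)) (m n : Int) (h : ∀ p ∈ base, p.1 ≠ m) :
    (PySem.Dict.mk (base ++ [(m, n)])).getD m 0 = n := by
  induction base with
  | nil => simp [PySem.Dict.getD_eq_get?_getD, PySem.Dict.get?_mk_cons]
  | cons p ps ih =>
    have hp : p.1 ≠ m := h p (by simp)
    rw [PySem.Dict.getD_eq_get?_getD] at ih ⊢
    rw [List.cons_append, PySem.Dict.get?_mk_cons, if_neg (by simpa using hp)]
    exact ih (fun q hq => h q (by simp [hq]))

lemma contains_last (base : List (Int × Int)) (m n : Int) :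
    (PySem.Dict.mk (base ++ [(m, n)])).contains m = true := by
  induction base with
  | nil => simp [PySem.Dict.contains_mk]
  | cons p ps ih =>
    simp only [PySem.Dict.contains_mk] at ih ⊢
    simp_all

lemma not_contains_big (base : List (Int × Int)) (m : Int) (h : ∀ p ∈ base, p.1 < m) :
    (PySem.Dict.mk base).contains m = false := by
  rw [PySem.Dict.contains_mk, List.any_eq_false]
  intro p hp
  have := h p hp
  simpa using (by omega : ¬ p.1 = m)

-- B passes 2 and 3: tallying the label sequence and summing triangles
lemma tally_inv (rest : List Char) : ∀ (base : List (Int × Int)) (m n : Int) (cc : Char),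
    (∀ p ∈ base, p.1 < m) →
    sumTri ((List.foldl tallyStep (PySem.Dict.mk (base ++ [(m, n)])) (marksSeq cc m rest)).values)
      = sumTri (base.map (·.2)) + sumTri (runLens cc n rest) := by
  induction rest with
  | nil =>
    intro base m n cc _
    simp [marksSeq, runLens, sumTri, PySem.Dict.values]
  | cons r t ih =>
    intro base m n cc hlt
    by_cases hc : cc = r
    · have hm : marksSeq cc m (r :: t) = m :: marksSeq r m t := by
        simp [marksSeq, hc]
      rw [hm]
      simp only [List.foldl_cons]
      have hne : ∀ p ∈ base, p.1 ≠ m := fun p hp => by have := hlt p hp; omega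
      have hstep : tallyStep (PySem.Dict.mk (base ++ [(m, n)])) m
          = PySem.Dict.mk (base ++ [(m, n + 1)]) := by
        unfold tallyStep
        rw [getD_last base m n hne]
        apply PySem.Dict.ext
        rw [PySem.Dict.items_insert_of_contains _ _ (contains_last base m n)]
        show (base ++ [(m, n)]).map _ = _
        rw [List.map_append]
        congr 1
        · have hid : List.map (fun p : Int × Int => if (p.1 == m) = true then (m, n + 1) else p) base
              = List.map id base :=
            List.map_congr_left (fun p hp => by
              simp [show (p.1 == m) = false by simpa using hne p hp])
          simpa using hid
        · simp
      rw [hstep, ih base m (n + 1) r hlt, runLens, if_pos hc, hc]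
    · have hm : marksSeq cc m (r :: t) = (m + 1) :: marksSeq r (m + 1) t := by
        simp [marksSeq, hc]
      rw [hm]
      simp only [List.foldl_cons]
      have hlt' : ∀ p ∈ base ++ [(m, n)], p.1 < m + 1 := by
        intro p hp
        rcases List.mem_append.mp hp with h1 | h1
        · have := hlt p h1; omega
        · rcases List.mem_singleton.mp h1 with rfl; simp
      have hstep : tallyStep (PySem.Dict.mk (base ++ [(m, n)])) (m + 1)
          = PySem.Dict.mk ((base ++ [(m, n)]) ++ [(m + 1, 1)]) := by
        unfold tallyStep
        rw [PySem.Dict.getD_of_not_contains _ _ (not_contains_big _ _ hlt')]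
        apply PySem.Dict.ext
        rw [PySem.Dict.items_insert_of_not_contains _ _ (not_contains_big _ _ hlt')]
        norm_num
      rw [hstep, ih (base ++ [(m, n)]) (m + 1) 1 r hlt']
      rw [runLens, if_neg hc]
      simp [sumTri]; ring

-- ===== VERDICT =====
theorem solve_spec : Claim_equal_solve := by
  intro s _ hpre
  unfold Spec_solve solve solve_alt
  match h : s.toList with
  | [] => exact absurd (by simpa using h) hpre
  | c :: rest =>
    -- A side
    rw [PySem.List.enumerate_cons]
    simp only [List.foldl_cons]
    have hA0 : solveStepA (1, 1, c) (0, c) = (1, 1, c) := by simp [solveStepA]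
    rw [hA0]
    have hA := a_inv rest 0 1 c 1 (by omega)
    rw [triB_one] at hA
    simp only [zero_add] at hA ⊢
    rw [hA]
    -- B side
    have hne : ((c :: rest : List Char).isEmpty) = false := by simp
    rw [hne]
    simp only [Bool.false_eq_true, if_false]
    rw [PySem.List.slice_from_one]
    show sumTri (runLens c 1 rest)
        = sumTri ((List.foldl tallyStep PySem.Dict.empty
            (List.foldl markStep [0] ((c :: rest).zip rest))).values)
    rw [marks_inv rest [0] [] c 0 rfl]
    simp only [List.cons_append, List.nil_append, List.foldl_cons]
    have h0 : tallyStep PySem.Dict.empty 0 = PySem.Dict.mk ([] ++ [((0 : Int), (1 : Int))]) := by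
      simp [tallyStep]; rfl
    rw [h0, tally_inv rest [] 0 1 c (by simp)]
    simp [sumTri]
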